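-- pv_equiv track=rewrite | github.com/MarioGuerra21008/LabD-LexAnalyzerGen | lexicalAnalyzerGen.py | getFinalRegex
-- ===== SOURCE A (Python) =====
-- def getFinalRegex(yalexRegex, yalexFunctions):
--             yalexRegex4 = []
--             for el in yalexRegex:
--                 if el in yalexFunctions:
--                     yalexRegex4.extend(getFinalRegex(yalexFunctions[el], yalexFunctions))
--                 else:
--                     yalexRegex4.append(el)
--             return yalexRegex4
-- ===== SOURCE B (Python) =====
-- def getFinalRegex(yalexRegex, yalexFunctions):
--     # Bottom-up: iteratively flatten every function body until a fixed point
--     # (len(yalexFunctions) rounds always suffice on acyclic inputs), then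
--     # expand the regex with a single lookup per element.
--     expanded = dict(yalexFunctions)
--     for _ in range(len(yalexFunctions)):
--         new = {k: [x for el in body for x in expanded.get(el, [el])]
--                for k, body in expanded.items()}
--         if new == expanded:
--             break
--         expanded = new
--     result = []
--     for el in yalexRegex:
--         result.extend(expanded.get(el, [el]))
--     return result
-- ===== Notes on version B (the rewrite author's own statement) =====
-- stated objective: alternative
-- what changed: Replaces A's top-down recursion with a bottom-up fixed-point: iteratively flatten all function bodies len(yalexFunctions) times, then expand the regex with single lookups; no recursion at all.
import Mathlib
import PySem

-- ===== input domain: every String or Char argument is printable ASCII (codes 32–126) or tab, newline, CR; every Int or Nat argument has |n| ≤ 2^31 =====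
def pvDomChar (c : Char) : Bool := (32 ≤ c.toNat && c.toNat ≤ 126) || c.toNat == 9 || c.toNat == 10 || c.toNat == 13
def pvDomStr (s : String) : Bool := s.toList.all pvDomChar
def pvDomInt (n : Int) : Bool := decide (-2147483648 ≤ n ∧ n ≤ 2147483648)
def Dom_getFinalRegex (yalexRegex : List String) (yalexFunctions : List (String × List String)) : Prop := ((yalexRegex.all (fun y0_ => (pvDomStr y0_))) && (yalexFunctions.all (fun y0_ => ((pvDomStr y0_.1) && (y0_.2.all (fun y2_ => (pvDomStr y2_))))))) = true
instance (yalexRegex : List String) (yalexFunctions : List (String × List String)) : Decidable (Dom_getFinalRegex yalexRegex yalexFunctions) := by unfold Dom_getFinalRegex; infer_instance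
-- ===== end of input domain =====

-- B replaces A's top-down recursion by a bottom-up fixed-point substitution (alternative
-- decomposition, no speed claim); equivalence is about the return value only.

-- first-match lookup in the association list (Python dict lookup)
def lookA (fns : List (String × List String)) (k : String) : Option (List String) :=
  match fns with
  | [] => none
  | (k', b) :: rest => if k' = k then some b else lookA rest k

-- ===== PORT A =====
-- fuel guard only makes the recursion total; under Pre_ the fuel is never exhausted
def getFinalRegexFuel : Nat → List String → List (String × List String) → List String
  | 0, _, _ => []
  | Nat.succ n, yalexRegex, yalexFunctions =>
      yalexRegex.foldl (fun yalexRegex4 el =>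
        match lookA yalexFunctions el with
        | some body => yalexRegex4 ++ getFinalRegexFuel n body yalexFunctions
        | none => yalexRegex4 ++ [el]) []

def getFinalRegex (yalexRegex : List String) (yalexFunctions : List (String × List String)) : List String :=
  getFinalRegexFuel (yalexFunctions.length + 1) yalexRegex yalexFunctions

-- ===== PORT B =====
-- one round of the dict comprehension: substitute the current table once into every body
def stepExp (e : List (String × List String)) : List (String × List String) :=
  e.map (fun kb => (kb.1, kb.2.flatMap (fun el => (lookA e el).getD [el])))

-- the round loop with its fixed-point early exit ('if new == expanded: break')
def iterLoop : Nat → List (String × List String) → List (String × List String)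
  | 0, e => e
  | Nat.succ n, e =>
      let new := stepExp e
      if new = e then e else iterLoop n new

def getFinalRegex_alt (yalexRegex : List String) (yalexFunctions : List (String × List String)) : List String :=
  let expanded := iterLoop yalexFunctions.length yalexFunctions
  yalexRegex.foldl (fun result el => result ++ (lookA expanded el).getD [el]) []

-- ===== PRECONDITION & SPEC =====
-- okN fns n el: the chain of function references starting at el bottoms out within depth n
-- (a bounded-depth acyclicity condition on the reference graph, stated with List.find?/all)
def okN (fns : List (String × List String)) : Nat → String → Bool
  | 0, el => fns.all (fun kb => kb.1 ≠ el)
  | Nat.succ n, el =>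
      match fns.find? (fun kb => kb.1 == el) with
      | some kb => kb.2.all (okN fns n)
      | none => true

-- Pre_ excludes inputs whose function references form a cycle reachable from yalexRegex
-- (depth > |fns| is impossible on acyclic references); on those inputs A raises RecursionError.
def Pre_getFinalRegex (yalexRegex : List String) (yalexFunctions : List (String × List String)) : Prop :=
  yalexRegex.all (okN yalexFunctions yalexFunctions.length) = true

instance (yalexRegex : List String) (yalexFunctions : List (String × List String)) : Decidable (Pre_getFinalRegex yalexRegex yalexFunctions) := by unfold Pre_getFinalRegex; infer_instance

def pvWitness_getFinalRegex : List String × (List (String × List String)) :=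
  (["a", "x"], [("a", ["b", "c"]), ("b", ["d"])])

def Spec_getFinalRegex (yalexRegex : List String) (yalexFunctions : List (String × List String)) (out : List String) : Prop := out = getFinalRegex_alt yalexRegex yalexFunctions
instance (yalexRegex : List String) (yalexFunctions : List (String × List String)) (out : List String) : Decidable (Spec_getFinalRegex yalexRegex yalexFunctions out) := by unfold Spec_getFinalRegex; infer_instance

-- ===== CLAIM (what is proved, stated in full; the proofs are below) =====
def Claim_equal_getFinalRegex : Prop := ∀ (yalexRegex : List String) (yalexFunctions : List (String × List String)), Dom_getFinalRegex yalexRegex yalexFunctions → Pre_getFinalRegex yalexRegex yalexFunctions → Spec_getFinalRegex yalexRegex yalexFunctions (getFinalRegex yalexRegex yalexFunctions)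

-- ===== LEMMAS AND PROOFS =====

-- P fns n el: the reference expansion of el cut off at depth n (specification function)
def P (fns : List (String × List String)) : Nat → String → List String
  | 0, el => [el]
  | Nat.succ n, el =>
      match lookA fns el with
      | some b => b.flatMap (P fns n)
      | none => [el]

-- plain n-fold iteration of stepExp (proof-side; iterLoop equals it, fixed points persist)
def iterExp : Nat → List (String × List String) → List (String × List String)
  | 0, e => e
  | Nat.succ n, e => stepExp (iterExp n e)

theorem iterExp_fix (e : List (String × List String)) (h : stepExp e = e) :
    ∀ n, iterExp n e = e := by
  intro n
  induction n with
  | zero => rfl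
  | succ n ih => simp [iterExp, ih, h]

theorem iterExp_step_comm (n : Nat) :
    ∀ e, iterExp n (stepExp e) = stepExp (iterExp n e) := by
  induction n with
  | zero => intro e; rfl
  | succ n ih => intro e; simp [iterExp, ih]

theorem iterLoop_eq_iterExp (n : Nat) :
    ∀ e, iterLoop n e = iterExp n e := by
  induction n with
  | zero => intro e; rfl
  | succ n ih =>
      intro e
      by_cases h : stepExp e = e
      · simp [iterLoop, h, iterExp, iterExp_fix e h]
      · simp [iterLoop, h, iterExp, ih, iterExp_step_comm]

theorem lookA_eq_find (fns : List (String × List String)) (k : String) :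
    lookA fns k = (fns.find? (fun kb => kb.1 == k)).map (·.2) := by
  induction fns with
  | nil => rfl
  | cons kb rest ih =>
      obtain ⟨k', b⟩ := kb
      by_cases h : k' = k
      · subst h; simp [lookA, List.find?]
      · simp [lookA, h, ih]

theorem find_none_of_all_ne (fns : List (String × List String)) (el : String)
    (h : fns.all (fun kb => kb.1 ≠ el) = true) :
    fns.find? (fun kb => kb.1 == el) = none := by
  rw [List.find?_eq_none]
  intro kb hkb
  simp only [List.all_eq_true, decide_eq_true_eq] at h
  simp [h kb hkb]

theorem okN_zero_none (fns : List (String × List String)) (el : String)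
    (h : okN fns 0 el = true) : lookA fns el = none := by
  rw [lookA_eq_find, find_none_of_all_ne fns el h]
  rfl

theorem okN_succ_some (fns : List (String × List String)) (el : String) (n : Nat)
    (b : List String) (hl : lookA fns el = some b)
    (h : okN fns (n + 1) el = true) : b.all (okN fns n) = true := by
  rw [lookA_eq_find] at hl
  cases hf : fns.find? (fun kb => kb.1 == el) with
  | none => rw [hf] at hl; simp at hl
  | some kb =>
      rw [hf] at hl
      simp only [Option.map_some, Option.some.injEq] at hl
      simp only [okN, hf] at h
      rwa [hl] at h

theorem foldl_app (g : String → List String) (l : List String) (acc : List String) :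
    l.foldl (fun a e => a ++ g e) acc = acc ++ l.flatMap g := by
  induction l generalizing acc with
  | nil => simp
  | cons x xs ih => simp [ih, List.append_assoc]

theorem flatMap_congr_mem (l : List String) (f g : String → List String)
    (h : ∀ x ∈ l, f x = g x) : l.flatMap f = l.flatMap g := by
  induction l with
  | nil => rfl
  | cons x xs ih =>
      simp only [List.flatMap_cons]
      rw [h x (List.mem_cons_self), ih (fun y hy => h y (List.mem_cons_of_mem _ hy))]

theorem flatMap_assoc (l : List String) (f g : String → List String) :
    (l.flatMap f).flatMap g = l.flatMap (fun x => (f x).flatMap g) := by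
  induction l with
  | nil => rfl
  | cons x xs ih => simp [List.flatMap_cons, ih]

theorem P_nonkey (fns : List (String × List String)) (el : String)
    (h : lookA fns el = none) (n : Nat) : P fns n el = [el] := by
  cases n <;> simp [P, h]

theorem P_comp (fns : List (String × List String)) (a : Nat) :
    ∀ (el : String) (b : Nat), (P fns a el).flatMap (P fns b) = P fns (a + b) el := by
  induction a with
  | zero => intro el b; simp [P]
  | succ a ih =>
      intro el b
      cases h : lookA fns el with
      | none => simp [P_nonkey fns el h]
      | some bd =>
          have hab : a + 1 + b = (a + b) + 1 := by omega
          rw [hab]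
          simp only [P, h]
          rw [flatMap_assoc]
          exact flatMap_congr_mem _ _ _ (fun x _ => ih x b)

theorem lookA_map (g : String × List String → List String) (e : List (String × List String)) (k : String) :
    lookA (e.map (fun kb => (kb.1, g kb))) k = Option.map (fun b => g (k, b)) (lookA e k) := by
  induction e with
  | nil => rfl
  | cons kb rest ih =>
      obtain ⟨k', b⟩ := kb
      by_cases h : k' = k
      · subst h; simp [lookA]
      · simp [lookA, h, ih]

theorem lookA_step (e : List (String × List String)) (k : String) :
    lookA (stepExp e) k =
      Option.map (fun b => b.flatMap (fun el => (lookA e el).getD [el])) (lookA e k) := by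
  simpa using lookA_map (fun kb => kb.2.flatMap (fun el => (lookA e el).getD [el])) e k

theorem lookA_iter_isSome (fns : List (String × List String)) (i : Nat) (el : String) :
    (lookA (iterExp i fns) el).isSome = (lookA fns el).isSome := by
  induction i with
  | zero => rfl
  | succ i ih => simp [iterExp, lookA_step, Option.isSome_map, ih]

theorem G_iter (fns : List (String × List String)) (i : Nat) (el : String) :
    (lookA (iterExp i fns) el).getD [el] = P fns (2 ^ i) el := by
  induction i generalizing el with
  | zero =>
      cases h : lookA fns el with
      | none => simp [iterExp, h, P_nonkey fns el h]
      | some b => simp [iterExp, h, P]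
  | succ i ih =>
      simp only [iterExp, lookA_step]
      cases h : lookA (iterExp i fns) el with
      | none =>
          have hf : lookA fns el = none := by
            have hk := lookA_iter_isSome fns i el
            rw [h] at hk
            cases hf : lookA fns el with
            | none => rfl
            | some b => rw [hf] at hk; simp at hk
          simp [P_nonkey fns el hf]
      | some b =>
          have hb : b = P fns (2 ^ i) el := by
            have := ih el; rw [h] at this; simpa using this
          simp only [Option.map_some, Option.getD_some]
          calc b.flatMap (fun el' => (lookA (iterExp i fns) el').getD [el'])
              = b.flatMap (P fns (2 ^ i)) := flatMap_congr_mem _ _ _ (fun x _ => ih x)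
            _ = (P fns (2 ^ i) el).flatMap (P fns (2 ^ i)) := by rw [← hb]
            _ = P fns (2 ^ i + 2 ^ i) el := P_comp fns _ el _
            _ = P fns (2 ^ (i + 1)) el := by rw [pow_succ]; ring_nf

theorem okN_mono (fns : List (String × List String)) (n : Nat) :
    ∀ el, okN fns n el = true → okN fns (n + 1) el = true := by
  induction n with
  | zero =>
      intro el h
      have hf := find_none_of_all_ne fns el h
      simp [okN, hf]
  | succ n ih =>
      intro el h
      cases hf : fns.find? (fun kb => kb.1 == el) with
      | none => simp [okN, hf]
      | some kb =>
          simp only [okN, hf, List.all_eq_true] at h ⊢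
          exact fun x hx => ih x (h x hx)

theorem okN_le (fns : List (String × List String)) (n : Nat) :
    ∀ m, n ≤ m → ∀ el, okN fns n el = true → okN fns m el = true := by
  intro m
  induction m with
  | zero =>
      intro hm el he
      have h0 : n = 0 := Nat.le_zero.mp hm
      subst h0; exact he
  | succ m ih =>
      intro hm el he
      rcases Nat.lt_or_ge n (m + 1) with hlt | hge
      · exact okN_mono fns m el (ih (by omega) el he)
      · have hn : n = m + 1 := by omega
        subst hn; exact he

theorem P_stab (fns : List (String × List String)) (n : Nat) :
    ∀ el, okN fns n el = true → P fns (n + 1) el = P fns n el := by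
  induction n with
  | zero =>
      intro el h
      simp [P_nonkey fns el (okN_zero_none fns el h)]
  | succ n ih =>
      intro el h
      cases hl : lookA fns el with
      | none => simp [P_nonkey fns el hl]
      | some b =>
          have hall := okN_succ_some fns el n b hl h
          simp only [List.all_eq_true] at hall
          simp only [P, hl]
          exact flatMap_congr_mem _ _ _ (fun x hx => ih x (hall x hx))

theorem P_mono (fns : List (String × List String)) (n : Nat) (el : String)
    (h : okN fns n el = true) : ∀ m, n ≤ m → P fns m el = P fns n el := by
  intro m
  induction m with
  | zero =>
      intro hm
      have h0 : n = 0 := Nat.le_zero.mp hm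
      subst h0; rfl
  | succ m ih =>
      intro hm
      rcases Nat.lt_or_ge n (m + 1) with hlt | hge
      · rw [P_stab fns m el (okN_le fns n m (by omega) el h)]
        exact ih (by omega)
      · have hn : n = m + 1 := by omega
        subst hn; rfl

theorem fuel_flat (n : Nat) (regex : List String) (fns : List (String × List String)) :
    getFinalRegexFuel (n + 1) regex fns =
      regex.flatMap (fun el =>
        match lookA fns el with
        | some body => getFinalRegexFuel n body fns
        | none => [el]) := by
  have h1 : getFinalRegexFuel (n + 1) regex fns =
      regex.foldl (fun acc el => acc ++ (match lookA fns el with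
        | some body => getFinalRegexFuel n body fns
        | none => [el])) [] := by
    show regex.foldl _ [] = _
    congr 1
    funext acc el
    cases lookA fns el <;> rfl
  rw [h1, foldl_app, List.nil_append]

theorem expA (fns : List (String × List String)) (n : Nat) :
    ∀ regex : List String, regex.all (okN fns n) = true →
      getFinalRegexFuel (n + 1) regex fns = regex.flatMap (P fns n) := by
  induction n with
  | zero =>
      intro regex hall
      rw [fuel_flat]
      apply flatMap_congr_mem
      intro x hx
      simp only [List.all_eq_true] at hall
      have hok := okN_zero_none fns x (hall x hx)
      simp [hok, P_nonkey fns x hok]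
  | succ n ih =>
      intro regex hall
      rw [fuel_flat]
      apply flatMap_congr_mem
      intro x hx
      simp only [List.all_eq_true] at hall
      have hok := hall x hx
      cases hl : lookA fns x with
      | none => simp [P_nonkey fns x hl]
      | some b =>
          simp only [P, hl]
          exact ih b (okN_succ_some fns x n b hl hok)

-- ===== VERDICT (by name: the statement is the Claim_ definition above) =====
theorem getFinalRegex_spec : Claim_equal_getFinalRegex := by
  intro regex fns _dom pre
  unfold Spec_getFinalRegex getFinalRegex getFinalRegex_alt
  unfold Pre_getFinalRegex at pre
  rw [expA fns fns.length regex pre]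
  rw [iterLoop_eq_iterExp]
  rw [foldl_app (fun el => (lookA (iterExp fns.length fns) el).getD [el]) regex []]
  rw [List.nil_append]
  apply flatMap_congr_mem
  intro x hx
  simp only [List.all_eq_true] at pre
  have hok := pre x hx
  rw [G_iter fns fns.length x]
  exact (P_mono fns fns.length x hok (2 ^ fns.length)
    (Nat.le_of_lt Nat.lt_two_pow_self)).symm
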